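-- pv_equiv track=rewrite | github.com/suhyehye/Coding-Test | 프로그래머스/3/64064. 불량 사용자/불량 사용자.py | solution
-- ===== SOURCE A (Python) =====
-- from itertools import product
--
-- def solution(user_id, banned_id):
--     arr = []
--     for ban in banned_id:
--         tmp = set()
--         idx = [i for i,x in enumerate(ban) if x == '*']
--         for uid in user_id:
--             n_uid = ''.join([x if i not in idx else '*' for i,x in enumerate(uid)])
--             if n_uid == ban:
--                 tmp.add(uid)
--         arr.append(tmp)
--
--     arr = list(product(*arr))
--     arr = set([tuple(sorted(x)) for x in arr if len(set(x)) == len(x)])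
--     return len(arr)
-- ===== SOURCE B (Python) =====
-- def solution(user_id, banned_id):
--     def matches(uid, ban):
--         return len(uid) == len(ban) and all(b == '*' or u == b for u, b in zip(uid, ban))
--
--     results = set()
--
--     def dfs(i, used):
--         if i == len(banned_id):
--             results.add(tuple(sorted(used)))
--             return
--         for uid in user_id:
--             if uid not in used and matches(uid, banned_id[i]):
--                 used.append(uid)
--                 dfs(i + 1, used)
--                 used.pop()
--
--     dfs(0, [])
--     return len(results)
-- ===== Notes on version B (the rewrite author's own statement) =====
-- stated objective: faster
-- what changed: A materialises the full cartesian product of per-pattern candidate sets, then filters tuples for distinctness and dedups sorted tuples; B is a recursive backtracking search (dfs over patterns with a 'used' list) that enforces distinctness while building each assignment, so invalid branches are pruned before they multiply instead of being generated and discarded.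
import Mathlib
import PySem

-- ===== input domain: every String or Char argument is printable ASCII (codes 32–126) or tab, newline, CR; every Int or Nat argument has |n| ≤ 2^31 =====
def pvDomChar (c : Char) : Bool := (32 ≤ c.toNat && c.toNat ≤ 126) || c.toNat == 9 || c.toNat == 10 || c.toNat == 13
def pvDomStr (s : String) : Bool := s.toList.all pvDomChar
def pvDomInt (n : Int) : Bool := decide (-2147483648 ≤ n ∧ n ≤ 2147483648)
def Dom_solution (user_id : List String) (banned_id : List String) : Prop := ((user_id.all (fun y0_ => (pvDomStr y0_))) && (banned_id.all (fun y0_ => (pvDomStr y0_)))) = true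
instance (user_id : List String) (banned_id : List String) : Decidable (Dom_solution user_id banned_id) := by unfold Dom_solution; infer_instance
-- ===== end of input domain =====

-- B replaces A's materialised cartesian product + post-hoc distinctness filter + dedup by a
-- recursive backtracking search that keeps the chosen users distinct as it goes, pruning invalid
-- branches before they multiply (objective: faster — measured faster in a timing run).

-- ===== PORT A =====
-- n_uid = ''.join([x if i not in idx else '*' for i,x in enumerate(uid)]), compared to ban as a char list
def pvMaskA (ban uid : List Char) : List Char :=
  let idx := ((PySem.List.enumerate ban).filter (fun p => p.2 == '*')).map (fun p => p.1)
  (PySem.List.enumerate uid).map (fun p => if p.1 ∈ idx then '*' else p.2)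

-- the inner loop of A building tmp for one ban
def pvTmpA (user_id : List String) (ban : String) : PySem.Set String :=
  user_id.foldl (fun tmp uid =>
    if pvMaskA ban.toList uid.toList = ban.toList then PySem.Set.add tmp uid else tmp)
    PySem.Set.empty

-- itertools.product(*arr): tuples in order, last component fastest
def pvProdA : List (PySem.Set String) → List (List String)
  | [] => [[]]
  | s :: rest => s.flatMap (fun x => (pvProdA rest).map (fun t => x :: t))

def solution (user_id : List String) (banned_id : List String) : Int :=
  let arr := banned_id.map (fun ban => pvTmpA user_id ban)
  let prod := pvProdA arr
  let res : PySem.Set (List String) :=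
    PySem.Set.ofList ((prod.filter
        (fun x => (PySem.Set.ofList x).length == x.length)).map
      (fun x => PySem.List.sorted x (fun s => s) false))
  (res.length : Int)

-- ===== PORT B =====
def pvMatchB (uid ban : List Char) : Bool :=
  uid.length == ban.length && (uid.zip ban).all (fun p => p.2 == '*' || p.1 == p.2)

-- dfs(i, used): structural recursion over the remaining banned patterns; the results set is threaded as `res`
def pvDfsB (user_id : List String) : List String → List String → PySem.Set (List String) → PySem.Set (List String)
  | [], used, res => PySem.Set.add res (PySem.List.sorted used (fun s => s) false)
  | ban :: rest, used, res =>
      user_id.foldl (fun r uid =>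
        if !used.contains uid && pvMatchB uid.toList ban.toList then
          pvDfsB user_id rest (used ++ [uid]) r
        else r) res

def solution_alt (user_id : List String) (banned_id : List String) : Int :=
  ((pvDfsB user_id banned_id [] PySem.Set.empty).length : Int)

-- ===== PRECONDITION & SPEC =====
def Spec_solution (user_id : List String) (banned_id : List String) (out : Int) : Prop := out = solution_alt user_id banned_id
instance (user_id : List String) (banned_id : List String) (out : Int) : Decidable (Spec_solution user_id banned_id out) := by unfold Spec_solution; infer_instance

-- ===== CLAIM (what is proved, stated in full; the proofs are below) =====
def Claim_equal_solution : Prop := ∀ (user_id : List String) (banned_id : List String), Dom_solution user_id banned_id → Spec_solution user_id banned_id (solution user_id banned_id)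

-- ===== LEMMAS AND PROOFS =====

-- the matching predicate both programs implement: u is a user that fits pattern b
def pvP (user_id : List String) (u b : String) : Prop :=
  u ∈ user_id ∧ pvMatchB u.toList b.toList = true

theorem pvMatchB_iff (uid ban : List Char) :
    pvMatchB uid ban = true ↔
      uid.length = ban.length ∧
        ∀ (k : Nat) (h : k < ban.length) (h' : k < uid.length), ban[k] = '*' ∨ uid[k] = ban[k] := by
  unfold pvMatchB
  simp only [Bool.and_eq_true, beq_iff_eq, List.all_eq_true, Bool.or_eq_true]
  constructor
  · rintro ⟨hlen, hall⟩
    refine ⟨hlen, ?_⟩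
    intro k hk hk'
    have hm : (uid.zip ban)[k]'(by simp [List.length_zip]; omega) ∈ uid.zip ban :=
      List.getElem_mem _
    have := hall _ hm
    simpa [List.getElem_zip] using this
  · rintro ⟨hlen, hall⟩
    refine ⟨hlen, ?_⟩
    intro p hp
    obtain ⟨k, hk, hpk⟩ := List.mem_iff_getElem.mp hp
    have hk' : k < uid.length := by simp [List.length_zip] at hk; omega
    have hk'' : k < ban.length := by omega
    subst hpk
    simpa [List.getElem_zip] using hall k hk'' hk'

theorem pvMask_idx_mem (ban : List Char) (i : Int) :
    i ∈ ((PySem.List.enumerate ban).filter (fun p => p.2 == '*')).map (fun p => p.1) ↔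
      ∃ (j : Nat) (h : j < ban.length), i = (j : Int) ∧ ban[j] = '*' := by
  simp only [List.mem_map, List.mem_filter, PySem.List.mem_enumerate_iff]
  constructor
  · rintro ⟨p, ⟨⟨k, hk, rfl⟩, hstar⟩, rfl⟩
    exact ⟨k, hk, by simp, by simpa using hstar⟩
  · rintro ⟨j, hj, rfl, hstar⟩
    exact ⟨((j : Int), ban[j]), ⟨⟨j, hj, by simp⟩, by simpa using hstar⟩, rfl⟩

theorem pvMask_eq_iff' (ban uid : List Char) :
    pvMaskA ban uid = ban ↔
      uid.length = ban.length ∧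
        ∀ (k : Nat) (h : k < ban.length) (h' : k < uid.length), ban[k] = '*' ∨ uid[k] = ban[k] := by
  unfold pvMaskA
  constructor
  · intro heq
    have hlen : uid.length = ban.length := by
      have := congrArg List.length heq
      simpa [PySem.List.length_enumerate] using this
    refine ⟨hlen, ?_⟩
    intro k hk hk'
    have hel := congrArg (fun l => l[k]?) heq
    simp only [List.getElem?_map, PySem.List.getElem?_enumerate] at hel
    rw [List.getElem?_eq_getElem hk', List.getElem?_eq_getElem hk] at hel
    simp only [Option.map_some] at hel
    by_cases hb : ban[k] = '*'
    · exact Or.inl hb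
    · right
      have hnid : ¬ ((0 : Int) + (k:Int) ∈ ((PySem.List.enumerate ban).filter (fun p => p.2 == '*')).map (fun p => p.1)) := by
        rw [pvMask_idx_mem]
        rintro ⟨j, hj, hji, hjs⟩
        have : j = k := by omega
        subst this; exact hb hjs
      simp only [hnid, Option.some.injEq] at hel
      simpa using hel
  · rintro ⟨hlen, hall⟩
    apply List.ext_getElem
    · simp [PySem.List.length_enumerate, hlen]
    · intro k hk1 hk2
      have hk' : k < uid.length := by simpa [PySem.List.length_enumerate] using hk1
      simp only [List.getElem_map, PySem.List.getElem_enumerate]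
      by_cases hb : ban[k] = '*'
      · have hid : ((0:Int) + (k:Int) ∈ ((PySem.List.enumerate ban).filter (fun p => p.2 == '*')).map (fun p => p.1)) := by
          rw [pvMask_idx_mem]; exact ⟨k, hk2, by simp, hb⟩
        rw [if_pos hid, hb]
      · have hnid : ¬ ((0:Int) + (k:Int) ∈ ((PySem.List.enumerate ban).filter (fun p => p.2 == '*')).map (fun p => p.1)) := by
          rw [pvMask_idx_mem]
          rintro ⟨j, hj, hji, hjs⟩
          have : j = k := by omega
          subst this; exact hb hjs
        rw [if_neg hnid]
        exact (hall k hk2 hk').resolve_left hb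

-- A's mask-and-compare test is B's char-by-char match
theorem pvMask_iff_match (ban uid : List Char) :
    pvMaskA ban uid = ban ↔ pvMatchB uid ban = true := by
  rw [pvMask_eq_iff', pvMatchB_iff]

theorem pvTmpA_eq (user_id : List String) (ban : String) :
    pvTmpA user_id ban = PySem.Set.ofList
      (user_id.filter (fun uid => decide (pvMaskA ban.toList uid.toList = ban.toList))) := by
  unfold pvTmpA
  rw [PySem.List.foldl_ite_eq_foldl_filter, PySem.Set.ofList_eq_foldl]
  rfl

theorem pvTmpA_mem (user_id : List String) (ban : String) (u : String) :
    u ∈ pvTmpA user_id ban ↔ pvP user_id u ban := by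
  rw [pvTmpA_eq, PySem.Set.mem_ofList, List.mem_filter]
  unfold pvP
  rw [decide_eq_true_iff, pvMask_iff_match]

theorem pvProdA_mem (ls : List (PySem.Set String)) (x : List String) :
    x ∈ pvProdA ls ↔ List.Forall₂ (fun (u : String) (s : PySem.Set String) => u ∈ s) x ls := by
  induction ls generalizing x with
  | nil => simp [pvProdA, List.forall₂_nil_right_iff]
  | cons s rest ih =>
    simp only [pvProdA, List.mem_flatMap, List.mem_map, ih, List.forall₂_cons_right_iff]
    constructor
    · rintro ⟨a, ha, t, ht, rfl⟩; exact ⟨a, t, ha, ht, rfl⟩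
    · rintro ⟨a, t, ha, ht, rfl⟩; exact ⟨a, ha, t, ht, rfl⟩

theorem pvOfList_length_eq_iff {α : Type} [DecidableEq α] (x : List α) :
    (PySem.Set.ofList x).length = x.length ↔ x.Nodup := by
  have hperm : (PySem.Set.ofList x).Perm x.dedup := by
    rw [List.perm_ext_iff_of_nodup (PySem.Set.nodup_ofList x) x.nodup_dedup]
    intro a; rw [PySem.Set.mem_ofList, List.mem_dedup]
  rw [hperm.length_eq]
  constructor
  · intro h
    have := (List.dedup_sublist x).eq_of_length h
    rw [← this]; exact x.nodup_dedup
  · intro h; rw [List.dedup_eq_self.mpr h]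

-- membership in A's final set
theorem pvA_mem (user_id banned_id : List String) (l : List String) :
    l ∈ (PySem.Set.ofList (((pvProdA (banned_id.map (fun ban => pvTmpA user_id ban))).filter
          (fun x => (PySem.Set.ofList x).length == x.length)).map
        (fun x => PySem.List.sorted x (fun s => s) false))) ↔
      ∃ seq, List.Forall₂ (pvP user_id) seq banned_id ∧ seq.Nodup ∧
        l = PySem.List.sorted seq (fun s => s) false := by
  simp only [PySem.Set.mem_ofList, List.mem_map, List.mem_filter, pvProdA_mem,
    List.forall₂_map_right_iff, beq_iff_eq, pvOfList_length_eq_iff]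
  constructor
  · rintro ⟨x, ⟨hf, hnd⟩, rfl⟩
    exact ⟨x, hf.imp (fun a b h => (pvTmpA_mem user_id b a).mp h), hnd, rfl⟩
  · rintro ⟨x, hf, hnd, rfl⟩
    exact ⟨x, ⟨hf.imp (fun a b h => (pvTmpA_mem user_id b a).mpr h), hnd⟩, rfl⟩

-- membership in B's dfs results
theorem pvDfsB_mem (user_id : List String) (bans : List String) :
    ∀ (used : List String) (res : PySem.Set (List String)) (l : List String), used.Nodup →
      (l ∈ pvDfsB user_id bans used res ↔ l ∈ res ∨
        ∃ seq, List.Forall₂ (pvP user_id) seq bans ∧ (used ++ seq).Nodup ∧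
          l = PySem.List.sorted (used ++ seq) (fun s => s) false) := by
  induction bans with
  | nil =>
    intro used res l hnd
    simp [pvDfsB, PySem.Set.mem_add, List.forall₂_nil_right_iff, hnd]
  | cons ban rest ih =>
    intro used res l hnd
    have key : ∀ (us : List String) (res : PySem.Set (List String)), (∀ u ∈ us, u ∈ user_id) →
        (l ∈ us.foldl (fun r uid =>
            if !used.contains uid && pvMatchB uid.toList ban.toList then
              pvDfsB user_id rest (used ++ [uid]) r
            else r) res ↔
          l ∈ res ∨ ∃ uid ∈ us, (uid ∉ used ∧ pvMatchB uid.toList ban.toList = true) ∧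
            ∃ seq', List.Forall₂ (pvP user_id) seq' rest ∧ ((used ++ [uid]) ++ seq').Nodup ∧
              l = PySem.List.sorted ((used ++ [uid]) ++ seq') (fun s => s) false) := by
      intro us
      induction us with
      | nil => simp
      | cons u us' ihus =>
        intro res hus
        rw [List.foldl_cons, ihus _ (fun v hv => hus v (List.mem_cons_of_mem _ hv))]
        by_cases hc : u ∉ used ∧ pvMatchB u.toList ban.toList = true
        · have hcb : (!used.contains u && pvMatchB u.toList ban.toList) = true := by
            simp [hc.2]; exact hc.1
          rw [if_pos hcb]
          have hnd' : (used ++ [u]).Nodup := by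
            rw [List.nodup_append]
            refine ⟨hnd, List.nodup_singleton u, ?_⟩
            intro a ha b hb hab
            rw [List.mem_singleton] at hb
            subst hb; subst hab; exact hc.1 ha
          rw [ih (used ++ [u]) res l hnd']
          constructor
          · rintro ((h | ⟨seq', hf, hn2, he⟩) | ⟨uid, hu, hcnd, hex⟩)
            · exact Or.inl h
            · exact Or.inr ⟨u, List.mem_cons_self, hc, seq', hf, hn2, he⟩
            · exact Or.inr ⟨uid, List.mem_cons_of_mem _ hu, hcnd, hex⟩
          · rintro (h | ⟨uid, hu, hcnd, hex⟩)
            · exact Or.inl (Or.inl h)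
            · rcases List.mem_cons.mp hu with rfl | hu'
              · exact Or.inl (Or.inr hex)
              · exact Or.inr ⟨uid, hu', hcnd, hex⟩
        · have hcb : ¬ ((!used.contains u && pvMatchB u.toList ban.toList) = true) := by
            intro hT
            simp only [Bool.and_eq_true, Bool.not_eq_true', List.contains_eq_mem, decide_eq_false_iff_not] at hT
            exact hc hT
          rw [if_neg hcb]
          constructor
          · rintro (h | ⟨uid, huid, hcond, hrest⟩)
            · exact Or.inl h
            · exact Or.inr ⟨uid, List.mem_cons_of_mem _ huid, hcond, hrest⟩
          · rintro (h | ⟨uid, huid, hcond, hrest⟩)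
            · exact Or.inl h
            · rcases List.mem_cons.mp huid with rfl | huid'
              · exact absurd hcond hc
              · exact Or.inr ⟨uid, huid', hcond, hrest⟩
    simp only [pvDfsB]
    rw [key user_id res (fun _ h => h)]
    constructor
    · rintro (h | ⟨uid, huid, ⟨hnu, hm⟩, seq', hf, hnd', heq⟩)
      · exact Or.inl h
      · refine Or.inr ⟨uid :: seq', List.Forall₂.cons ⟨huid, hm⟩ hf, ?_, ?_⟩
        · simpa [List.append_assoc] using hnd'
        · simpa [List.append_assoc] using heq
    · rintro (h | ⟨seq, hf, hnd', heq⟩)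
      · exact Or.inl h
      · rcases (List.forall₂_cons_right_iff).mp hf with ⟨uid, seq', ⟨huid, hm⟩, hf', rfl⟩
        have hnu : uid ∉ used := by
          rcases List.nodup_append.mp hnd' with ⟨-, -, hdisj⟩
          intro hmem
          exact hdisj uid hmem uid (List.mem_cons_self) rfl
        refine Or.inr ⟨uid, huid, ⟨hnu, hm⟩, seq', hf', ?_, ?_⟩
        · simpa [List.append_assoc] using hnd'
        · simpa [List.append_assoc] using heq

theorem pvDfsB_nodup (user_id : List String) (bans : List String) :
    ∀ (used : List String) (res : PySem.Set (List String)), res.Nodup →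
      (pvDfsB user_id bans used res).Nodup := by
  induction bans with
  | nil =>
    intro used res h
    exact PySem.Set.nodup_add res _ h
  | cons ban rest ih =>
    intro used res h
    simp only [pvDfsB]
    have key : ∀ (us : List String) (res : PySem.Set (List String)), res.Nodup →
        (us.foldl (fun r uid =>
            if !used.contains uid && pvMatchB uid.toList ban.toList then
              pvDfsB user_id rest (used ++ [uid]) r
            else r) res).Nodup := by
      intro us
      induction us with
      | nil => intro res h; exact h
      | cons u us' ihus =>
        intro res h
        rw [List.foldl_cons]
        apply ihus
        by_cases hc : (!used.contains u && pvMatchB u.toList ban.toList) = true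
        · rw [if_pos hc]; exact ih _ _ h
        · rw [if_neg hc]; exact h
    exact key user_id res h

-- ===== VERDICT (by name: the statement is the Claim_ definition above) =====
theorem solution_spec : Claim_equal_solution := by
  intro user_id banned_id _
  unfold Spec_solution
  dsimp only [solution, solution_alt]
  congr 1
  apply List.Perm.length_eq
  rw [List.perm_ext_iff_of_nodup (PySem.Set.nodup_ofList _)
    (pvDfsB_nodup user_id banned_id [] PySem.Set.empty List.nodup_nil)]
  intro l
  rw [pvA_mem, pvDfsB_mem user_id banned_id [] PySem.Set.empty l List.nodup_nil]
  simp [PySem.Set.empty]
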